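-- pv_equiv track=rewrite | github.com/DKorchagina/LuckyNumbers | LuckyNumbers.py | check_wrong_completed
-- ===== SOURCE A (Python) =====
-- def check_wrong_completed(mass):
--     for i in range(4):
--         prev = mass[i][0]
--         for j in range(1, 4):
--             if mass[i][j] != 0:
--                 if mass[i][j] > prev:
--                     prev = mass[i][j]
--                 else:
--                     return False
--     for j in range(4):
--         prev = mass[0][j]
--         for i in range(1, 4):
--             if mass[i][j] != 0:
--                 if mass[i][j] > prev:
--                     prev = mass[i][j]
--                 else:
--                     return False
--     return True
-- ===== SOURCE B (Python) =====
-- def check_wrong_completed(mass):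
--     def validate(line):
--         seq = [line[0]] + [x for x in line[1:] if x != 0]
--         return seq == sorted(seq) and len(set(seq)) == len(seq)
--     grid = [row[:4] for row in mass[:4]]
--     return all(validate(r) for r in grid) and all(validate(c) for c in zip(*grid))
-- ===== Notes on version B (the rewrite author's own statement) =====
-- stated objective: simpler
-- what changed: Replaced the two hand-written prev-tracking loop nests over indices with a single validate helper (sort-based strictly-increasing test ignoring non-leading zeros) applied to the rows and, via zip-transpose, to the columns of the 4x4 block.
import Mathlib
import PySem

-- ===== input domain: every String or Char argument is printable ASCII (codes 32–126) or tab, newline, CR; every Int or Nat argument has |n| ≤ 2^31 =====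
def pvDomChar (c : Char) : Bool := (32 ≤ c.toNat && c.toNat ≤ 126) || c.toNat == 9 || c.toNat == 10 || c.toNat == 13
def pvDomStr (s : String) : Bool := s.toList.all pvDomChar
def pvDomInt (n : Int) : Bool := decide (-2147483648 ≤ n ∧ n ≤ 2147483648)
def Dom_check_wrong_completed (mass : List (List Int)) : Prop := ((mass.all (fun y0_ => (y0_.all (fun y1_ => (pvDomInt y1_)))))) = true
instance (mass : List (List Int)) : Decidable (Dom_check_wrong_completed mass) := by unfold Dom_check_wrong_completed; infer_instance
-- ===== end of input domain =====

-- B replaces A's two hand-written prev-tracking loop nests with a single sort-based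
-- validate helper applied to the rows and (via transpose) the columns: simpler, same cost.

-- ===== PORT A =====
-- the body of A's inner loop: state = some prev, or none once A has returned False
def stepA (v : Nat → Int) (st : Option Int) (j : Nat) : Option Int :=
  match st with
  | none => none
  | some prev => if v j ≠ 0 then (if v j > prev then some (v j) else none) else some prev

-- one inner loop of A: prev = v 0; for j in range(1, 4): …
def lineA (v : Nat → Int) : Bool :=
  ((List.range' 1 3).foldl (stepA v) (some (v 0))).isSome

def check_wrong_completed (mass : List (List Int)) : Bool :=
  ((List.range 4).all fun i => lineA (fun j => (mass.getD i []).getD j 0)) &&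
  ((List.range 4).all fun j => lineA (fun i => (mass.getD i []).getD j 0))

-- ===== PORT B =====
-- termination facts for zipStar (cited by its decreasing_by)
lemma sum_map_tail_le (rows : List (List Int)) :
    ((rows.map List.tail).map List.length).sum ≤ (rows.map List.length).sum := by
  induction rows with
  | nil => simp
  | cons r rs ih => have h4 : r.tail.length = r.length - 1 := by simp
                    simp only [List.map_cons, List.sum_cons]
                    omega

lemma sum_map_tail_lt (r : List Int) (rs : List (List Int)) (hr : r.isEmpty = false) :
    (((r :: rs).map List.tail).map List.length).sum < ((r :: rs).map List.length).sum := by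
  have h1 := sum_map_tail_le rs
  have h2 : 0 < r.length := by cases r <;> simp_all
  have h4 : r.tail.length = r.length - 1 := by simp
  simp only [List.map_cons, List.sum_cons]
  omega

-- zip(*rows): columns until the shortest row is exhausted
def zipStar (rows : List (List Int)) : List (List Int) :=
  if rows.isEmpty || rows.any (·.isEmpty) then []
  else (rows.map (fun r => r.headD 0)) :: zipStar (rows.map (fun r => r.tail))
termination_by ((rows.map List.length).sum)
decreasing_by
  cases rows with
  | nil => simp_all
  | cons r rs =>
    have hr : r.isEmpty = false := by simp_all
    simpa using sum_map_tail_lt r rs hr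

-- seq = [line[0]] + [x for x in line[1:] if x != 0]
def seqB (line : List Int) : List Int :=
  match line with
  | [] => []
  | x :: rest => x :: rest.filter (fun y => decide (y ≠ 0))

-- validate(line): seq == sorted(seq) and len(set(seq)) == len(seq)
def validateB (line : List Int) : Bool :=
  let s := seqB line
  decide (s = PySem.List.sorted s (fun x => x)) && decide ((PySem.Set.ofList s).length = s.length)

def check_wrong_completed_alt (mass : List (List Int)) : Bool :=
  let grid := (mass.take 4).map (fun r => r.take 4)
  grid.all validateB && (zipStar grid).all validateB

-- ===== PRECONDITION & SPEC =====
-- the first row's reading order: its leading cell, then its nonzero cells among the next three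
def firstRowSeq (r : List Int) : List Int :=
  match r.take 4 with
  | [] => []
  | x :: rest => x :: rest.filter (fun y => decide (y ≠ 0))

-- Pre_ admits every input with a full 4x4 block, and every input whose first row already
-- violates the strict increase (A returns False there before reading anything else); it
-- excludes the remaining short inputs, on which A raises IndexError except when a later
-- row violates first (then A returns False, and B returns False as well).
def Pre_check_wrong_completed (mass : List (List Int)) : Prop :=
  (4 ≤ mass.length ∧ ∀ r ∈ mass.take 4, 4 ≤ r.length) ∨
  ¬ List.Pairwise (· < ·) (firstRowSeq (mass.headD []))
instance (mass : List (List Int)) : Decidable (Pre_check_wrong_completed mass) := by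
  unfold Pre_check_wrong_completed; infer_instance

def pvWitness_check_wrong_completed : List (List Int) :=
  [[1, 2, 3, 4], [2, 3, 4, 5], [3, 4, 5, 6], [4, 5, 6, 7]]

def Spec_check_wrong_completed (mass : List (List Int)) (out : Bool) : Prop := out = check_wrong_completed_alt mass
instance (mass : List (List Int)) (out : Bool) : Decidable (Spec_check_wrong_completed mass out) := by unfold Spec_check_wrong_completed; infer_instance

-- ===== CLAIM (what is proved, stated in full; the proofs are below) =====
def Claim_equal_check_wrong_completed : Prop := ∀ (mass : List (List Int)), Dom_check_wrong_completed mass → Pre_check_wrong_completed mass → Spec_check_wrong_completed mass (check_wrong_completed mass)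

-- ===== LEMMAS AND PROOFS =====

-- set(l) keeps a sublist of l
lemma set_sublist (l : List Int) : List.Sublist (PySem.Set.ofList l) l := by
  induction l with
  | nil => simp
  | cons x xs ih =>
    rw [PySem.Set.ofList_cons]
    exact List.Sublist.cons₂ x (List.Sublist.trans (by simp [PySem.Set.discard]) ih)

-- len(set(l)) == len(l) iff l has no duplicates
lemma setlen_iff (l : List Int) : (PySem.Set.ofList l).length = l.length ↔ l.Nodup := by
  constructor
  · intro h
    have h2 := (set_sublist l).eq_of_length h
    rw [← h2]; exact PySem.Set.nodup_ofList l
  · intro h; rw [PySem.Set.ofList_eq_self_of_nodup _ h]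

-- B's validate is the strictly-increasing test on seq
lemma validate_eq (l : List Int) :
    validateB l = decide ((seqB l).Pairwise (· < ·)) := by
  have key : (seqB l = PySem.List.sorted (seqB l) (fun x => x) ∧
      (PySem.Set.ofList (seqB l)).length = (seqB l).length) ↔ (seqB l).Pairwise (· < ·) := by
    constructor
    · rintro ⟨h1, h2⟩
      have hle : (seqB l).Pairwise (· ≤ ·) := by
        rw [h1]; exact (PySem.List.sorted_pairwise (seqB l) (fun x => x)).imp (by simp)
      have hnd : (seqB l).Nodup := (setlen_iff _).mp h2
      exact (hle.and hnd).imp (fun h => lt_of_le_of_ne h.1 h.2)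
    · intro hp
      refine ⟨?_, (setlen_iff _).mpr (hp.imp ne_of_lt)⟩
      exact (PySem.List.sorted_eq_of_perm_of_pairwise_lt _ _ _ (List.Perm.refl _) hp).symm
  simp only [validateB, ← Bool.decide_and]
  exact decide_eq_decide.mpr key

lemma foldl_stepA_none (v : Nat → Int) (idxs : List Nat) :
    idxs.foldl (stepA v) none = none := by
  induction idxs with
  | nil => rfl
  | cons j rest ih => simp [stepA, ih]

-- A's inner loop succeeds iff prev followed by the surviving (nonzero) values is a strict chain
lemma foldl_stepA_chain (v : Nat → Int) (idxs : List Nat) (prev : Int) :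
    (idxs.foldl (stepA v) (some prev)).isSome
      = decide ((prev :: (idxs.map v).filter (fun y => decide (y ≠ 0))).IsChain (· < ·)) := by
  induction idxs generalizing prev with
  | nil => simp
  | cons j rest ih =>
    by_cases hz : v j = 0
    · simp [stepA, hz, ih]
    · by_cases hgt : v j > prev
      · simp [stepA, hz, hgt, ih, List.isChain_cons_cons]
      · simp [stepA, hz, hgt, foldl_stepA_none, List.isChain_cons_cons]

-- A's inner loop equals B's validate on the 4 values it reads
lemma lineA_eq_validateB (v : Nat → Int) : lineA v = validateB [v 0, v 1, v 2, v 3] := by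
  rw [validate_eq]
  have h1 : List.range' 1 3 = [1, 2, 3] := rfl
  rw [lineA, h1, foldl_stepA_chain]
  simp [seqB, List.isChain_iff_pairwise]

-- A's first row scan fails outright when the first row violates the strict increase
lemma lineA_false_of_viol (r : List Int) (h : ¬ List.Pairwise (· < ·) (firstRowSeq r)) :
    lineA (fun j => r.getD j 0) = false := by
  rw [lineA, (rfl : List.range' 1 3 = [1, 2, 3]), foldl_stepA_chain]
  simp only [decide_eq_false_iff_not, List.isChain_iff_pairwise]
  rcases r with _ | ⟨a, _ | ⟨b, _ | ⟨c, _ | ⟨d, t⟩⟩⟩⟩ <;>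
    simp_all [firstRowSeq, List.range', List.filter_cons]

-- B's validate on the first row fails in the same situation
lemma validateB_false_of_viol (r : List Int) (h : ¬ List.Pairwise (· < ·) (firstRowSeq r)) :
    validateB (r.take 4) = false := by
  rw [validate_eq]
  have hseq : seqB (r.take 4) = firstRowSeq r := by
    cases h4 : r.take 4 <;> simp [seqB, firstRowSeq, h4]
  simp [hseq, h]

-- ===== VERDICT (by name: the statement is the Claim_ definition above) =====
theorem check_wrong_completed_spec : Claim_equal_check_wrong_completed := by
  intro mass _ hpre
  unfold Spec_check_wrong_completed
  rcases hpre with ⟨hlen, hrows⟩ | hviol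
  · rcases mass with _ | ⟨r0, _ | ⟨r1, _ | ⟨r2, _ | ⟨r3, t⟩⟩⟩⟩ <;> simp at hlen
    have h0 : 4 ≤ r0.length := hrows r0 (by simp)
    have h1 : 4 ≤ r1.length := hrows r1 (by simp [List.take])
    have h2 : 4 ≤ r2.length := hrows r2 (by simp [List.take])
    have h3 : 4 ≤ r3.length := hrows r3 (by simp [List.take])
    rcases r0 with _ | ⟨a00, _ | ⟨a01, _ | ⟨a02, _ | ⟨a03, t0⟩⟩⟩⟩ <;> simp at h0
    rcases r1 with _ | ⟨a10, _ | ⟨a11, _ | ⟨a12, _ | ⟨a13, t1⟩⟩⟩⟩ <;> simp at h1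
    rcases r2 with _ | ⟨a20, _ | ⟨a21, _ | ⟨a22, _ | ⟨a23, t2⟩⟩⟩⟩ <;> simp at h2
    rcases r3 with _ | ⟨a30, _ | ⟨a31, _ | ⟨a32, _ | ⟨a33, t3⟩⟩⟩⟩ <;> simp at h3
    simp [check_wrong_completed, check_wrong_completed_alt, List.range_succ,
      lineA_eq_validateB, zipStar]
  · rcases mass with _ | ⟨r0, rest⟩
    · simp [firstRowSeq] at hviol
    · have hA := lineA_false_of_viol r0 (by simpa using hviol)
      have hB := validateB_false_of_viol r0 (by simpa using hviol)
      simp only [List.getD_eq_getElem?_getD] at hA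
      simp [check_wrong_completed, check_wrong_completed_alt, List.range_succ, hA, hB]
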